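-- pv_equiv track=rewrite | github.com/gherrick0918/grimbrain | grimbrain/cli_helpers.py | _normalize_cmd
-- ===== SOURCE A (Python) =====
-- def _edit_distance_one(a: str, b: str) -> bool:
--     if abs(len(a) - len(b)) > 1:
--         return False
--     if len(a) == len(b):
--         return sum(x != y for x, y in zip(a, b)) == 1
--     if len(a) + 1 == len(b):
--         for i in range(len(b)):
--             if a[:i] == b[:i] and a[i:] == b[i + 1 :]:
--                 return True
--         return False
--     if len(b) + 1 == len(a):
--         for i in range(len(a)):
--             if a[:i] == b[:i] and a[i + 1 :] == b[i:]:
--                 return True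
--         return False
--     return False
--
-- def _normalize_cmd(cmd: str) -> str:
--     aliases = {"a": "attack", "atk": "attack", "c": "cast", "s": "status", "q": "quit"}
--     if cmd in aliases:
--         return aliases[cmd]
--     known = [
--         "attack",
--         "cast",
--         "status",
--         "quit",
--         "end",
--         "save",
--         "load",
--         "actions",
--         "grapple",
--         "shove",
--         "stand",
--     ]
--     for k in known:
--         if _edit_distance_one(cmd, k):
--             return k
--     return cmd
-- ===== SOURCE B (Python) =====
-- def _one_edit(a: str, b: str) -> bool:
--     # exactly one edit (insert/delete/substitute) apart, by structural recursion:
--     # strip the common first character; at the first mismatch, the single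
--     # remaining edit must make the rest equal.
--     if not a:
--         return len(b) == 1
--     if not b:
--         return len(a) == 1
--     if a[0] == b[0]:
--         return _one_edit(a[1:], b[1:])
--     return a[1:] == b[1:] or a == b[1:] or a[1:] == b
--
--
-- def _normalize_cmd(cmd: str) -> str:
--     aliases = {"a": "attack", "atk": "attack", "c": "cast", "s": "status", "q": "quit"}
--     hit = aliases.get(cmd)
--     if hit is not None:
--         return hit
--     known = [
--         "attack",
--         "cast",
--         "status",
--         "quit",
--         "end",
--         "save",
--         "load",
--         "actions",
--         "grapple",
--         "shove",
--         "stand",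
--     ]
--     return next((k for k in known if _one_edit(cmd, k)), cmd)
-- ===== Notes on version B (the rewrite author's own statement) =====
-- stated objective: simpler
-- what changed: Replaces the length-case analysis with quadratic slice comparisons in _edit_distance_one by a single structural recursion that strips the common prefix and, at the first mismatch, checks the one remaining edit (substitute/insert/delete) by suffix equality.
import Mathlib
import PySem

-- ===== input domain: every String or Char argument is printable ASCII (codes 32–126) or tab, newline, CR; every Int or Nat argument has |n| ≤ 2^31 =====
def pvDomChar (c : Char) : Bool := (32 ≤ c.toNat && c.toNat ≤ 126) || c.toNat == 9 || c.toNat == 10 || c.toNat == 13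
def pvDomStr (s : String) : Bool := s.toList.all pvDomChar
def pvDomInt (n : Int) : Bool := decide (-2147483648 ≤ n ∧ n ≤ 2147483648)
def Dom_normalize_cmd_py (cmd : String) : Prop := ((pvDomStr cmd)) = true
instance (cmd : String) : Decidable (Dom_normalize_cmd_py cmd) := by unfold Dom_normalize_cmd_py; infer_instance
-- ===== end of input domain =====

-- B replaces A's three-way length case analysis with slice loops by one structural
-- recursion stripping the common prefix (objective: simpler; no speed claim).

-- ===== PORT A =====
-- port of _edit_distance_one (string slices on the List Char side, per PySem convention)
def edOneA (a b : List Char) : Bool :=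
  if (PySem.List.len a - PySem.List.len b).natAbs > 1 then false
  else if PySem.List.len a = PySem.List.len b then
    decide ((((a.zip b).map (fun p => if p.1 ≠ p.2 then (1 : Int) else 0)).sum) = 1)
  else if PySem.List.len a + 1 = PySem.List.len b then
    -- for i in range(len(b)): if a[:i] == b[:i] and a[i:] == b[i+1:]: return True
    (List.range b.length).any (fun i =>
      PySem.List.slice a none (some (i : Int)) == PySem.List.slice b none (some (i : Int)) &&
      PySem.List.slice a (some (i : Int)) none == PySem.List.slice b (some ((i : Int) + 1)) none)
  else if PySem.List.len b + 1 = PySem.List.len a then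
    (List.range a.length).any (fun i =>
      PySem.List.slice a none (some (i : Int)) == PySem.List.slice b none (some (i : Int)) &&
      PySem.List.slice a (some ((i : Int) + 1)) none == PySem.List.slice b (some (i : Int)) none)
  else false

def normalize_cmd_py (cmd : String) : String :=
  let aliases : PySem.Dict String String :=
    PySem.Dict.ofList [("a", "attack"), ("atk", "attack"), ("c", "cast"), ("s", "status"), ("q", "quit")]
  match PySem.Dict.get? aliases cmd with
  | some v => v
  | none =>
    let known : List String :=
      ["attack", "cast", "status", "quit", "end", "save", "load", "actions", "grapple", "shove", "stand"]
    match known.find? (fun k => edOneA cmd.toList k.toList) with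
    | some k => k
    | none => cmd

-- ===== PORT B =====
-- port of _one_edit: structural recursion on both strings
def oneEditB : List Char → List Char → Bool
  | [], b => b.length == 1
  | x :: xs, [] => (x :: xs).length == 1
  | x :: xs, y :: ys =>
    if x == y then oneEditB xs ys
    else xs == ys || x :: xs == ys || xs == y :: ys

def normalize_cmd_py_alt (cmd : String) : String :=
  let hit := PySem.Dict.get?
    (PySem.Dict.ofList [("a", "attack"), ("atk", "attack"), ("c", "cast"), ("s", "status"), ("q", "quit")]) cmd
  hit.getD
    (((["attack", "cast", "status", "quit", "end", "save", "load", "actions", "grapple", "shove", "stand"] :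
        List String).find? (fun k => oneEditB cmd.toList k.toList)).getD cmd)

-- ===== PRECONDITION & SPEC =====
def Spec_normalize_cmd_py (cmd : String) (out : String) : Prop := out = normalize_cmd_py_alt cmd
instance (cmd : String) (out : String) : Decidable (Spec_normalize_cmd_py cmd out) := by unfold Spec_normalize_cmd_py; infer_instance

-- ===== CLAIM (what is proved, stated in full; the proofs are below) =====
def Claim_equal_normalize_cmd_py : Prop := ∀ (cmd : String), Dom_normalize_cmd_py cmd → Spec_normalize_cmd_py cmd (normalize_cmd_py cmd)

-- ===== LEMMAS AND PROOFS =====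

lemma mismatchSum_nonneg (l : List (Char × Char)) :
    0 ≤ ((l.map (fun p => if p.1 ≠ p.2 then (1 : Int) else 0)).sum) := by
  induction l with
  | nil => simp
  | cons p t ih => simp only [List.map_cons, List.sum_cons]; split_ifs <;> omega

lemma mismatchSum_eq_zero : ∀ (xs ys : List Char), xs.length = ys.length →
    ((((xs.zip ys).map (fun p => if p.1 ≠ p.2 then (1 : Int) else 0)).sum) = 0 ↔ xs = ys) := by
  intro xs
  induction xs with
  | nil => intro ys h; cases ys <;> simp_all
  | cons x xs ih =>
    intro ys h
    cases ys with
    | nil => simp at h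
    | cons y ys =>
      simp only [List.zip_cons_cons, List.map_cons, List.sum_cons]
      have h' : xs.length = ys.length := by simpa using h
      have hnn := mismatchSum_nonneg (xs.zip ys)
      by_cases hxy : x = y
      · subst hxy
        have hz : (if x ≠ x then (1 : Int) else 0) = 0 := by simp
        rw [hz, zero_add, ih ys h']
        simp
      · have ho : (if x ≠ y then (1 : Int) else 0) = 1 := by simp [hxy]
        rw [ho]
        constructor
        · intro hc; exfalso; omega
        · intro hc; injection hc with hh _; exact absurd hh hxy

-- the deletion-loop any, rewritten to take/drop
lemma sliceTo (a : List Char) (i : Nat) :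
    PySem.List.slice a none (some (i : Int)) = a.take i := PySem.List.slice_to_natCast a i

lemma sliceFrom (a : List Char) (i : Nat) :
    PySem.List.slice a (some (i : Int)) none = a.drop i := PySem.List.slice_from_natCast a i

lemma sliceFromSucc (a : List Char) (i : Nat) :
    PySem.List.slice a (some ((i : Int) + 1)) none = a.drop (i + 1) := by
  have : ((i : Int) + 1) = ((i + 1 : Nat) : Int) := by push_cast; ring
  rw [this, PySem.List.slice_from_natCast]

lemma beq_false_of_length_ne {xs ys : List Char} (h : xs.length ≠ ys.length) :
    (xs == ys) = false := by
  simp only [beq_eq_false_iff_ne]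
  intro he; exact h (he ▸ rfl)

lemma edOneA_cons_same (x : Char) (xs ys : List Char) :
    edOneA (x :: xs) (x :: ys) = edOneA xs ys := by
  simp only [edOneA, PySem.List.len_eq, List.length_cons, sliceTo, sliceFrom, sliceFromSucc]
  split_ifs with h1 h2 h3 h4 h5 h6 h7 h8 h9 <;> try (first | rfl | omega)
  · -- equal lengths
    simp only [List.zip_cons_cons, List.map_cons, List.sum_cons, ne_eq, not_true_eq_false,
      if_false, zero_add]
  · -- a shorter by one: deletion loop
    have hn : ys.length = xs.length + 1 := by omega
    simp only [List.range_succ_eq_map, List.any_cons, List.any_map, Function.comp_def,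
      List.take_succ_cons, List.drop_succ_cons, List.take_zero, List.drop_zero,
      List.cons_beq_cons, beq_self_eq_true, Bool.true_and, List.drop_one]
    by_cases he : (x :: xs : List Char) = ys
    · have hany : (List.range ys.length).any
          (fun i => (List.take i xs == List.take i ys) && (List.drop i xs == List.drop (i + 1) ys)) = true := by
        apply List.any_eq_true.mpr
        refine ⟨0, List.mem_range.mpr (by omega), ?_⟩
        simp [← he]
      rw [hany]; simp
    · have hf : ((x :: xs : List Char) == ys) = false := by simpa using he
      rw [hf]; simp
  · -- b shorter by one: symmetric deletion loop
    have hn : xs.length = ys.length + 1 := by omega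
    simp only [List.range_succ_eq_map, List.any_cons, List.any_map, Function.comp_def,
      List.take_succ_cons, List.drop_succ_cons, List.take_zero, List.drop_zero,
      List.cons_beq_cons, beq_self_eq_true, Bool.true_and, List.drop_one, List.tail_cons]
    by_cases he : xs = (x :: ys : List Char)
    · have hany : (List.range xs.length).any
          (fun i => (List.take i xs == List.take i ys) && (List.drop (i + 1) xs == List.drop i ys)) = true := by
        apply List.any_eq_true.mpr
        refine ⟨0, List.mem_range.mpr (by omega), ?_⟩
        simp [he]
      rw [hany]; simp
    · have hf : (xs == (x :: ys : List Char)) = false := by simpa using he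
      rw [hf]; simp

lemma edOneA_cons_ne (x y : Char) (xs ys : List Char) (hxy : x ≠ y) :
    edOneA (x :: xs) (y :: ys) = (xs == ys || x :: xs == ys || xs == y :: ys) := by
  have hxy' : (x == y) = false := by simpa using hxy
  simp only [edOneA, PySem.List.len_eq, List.length_cons, sliceTo, sliceFrom, sliceFromSucc]
  split_ifs with h1 h2 h3 h4 <;>
    [skip; skip; skip; skip; omega]
  · -- length gap ≥ 2: every disjunct is false by length
    rw [beq_false_of_length_ne (by omega : xs.length ≠ ys.length),
      beq_false_of_length_ne (by simp only [List.length_cons]; omega : (x :: xs).length ≠ ys.length),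
      beq_false_of_length_ne (by simp only [List.length_cons]; omega : xs.length ≠ (y :: ys).length)]
    simp
  · -- equal lengths: exactly-one-mismatch means tails equal
    have hlen : xs.length = ys.length := by omega
    have hnn := mismatchSum_nonneg (xs.zip ys)
    rw [beq_false_of_length_ne (by simp only [List.length_cons]; omega : (x :: xs).length ≠ ys.length),
      beq_false_of_length_ne (by simp only [List.length_cons]; omega : xs.length ≠ (y :: ys).length)]
    simp only [List.zip_cons_cons, List.map_cons, List.sum_cons, if_pos hxy,
      Bool.or_false]
    by_cases he : xs = ys
    · subst he
      have h0 := (mismatchSum_eq_zero xs xs rfl).mpr rfl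
      rw [h0]; simp
    · have hf : (xs == ys) = false := by simpa using he
      rw [hf]
      simp only [decide_eq_false_iff_not]
      intro hc
      exact he ((mismatchSum_eq_zero xs ys hlen).mp (by omega))
  · -- a shorter by one: only deleting b's first char can work
    rw [beq_false_of_length_ne (by omega : xs.length ≠ ys.length),
      beq_false_of_length_ne (by simp only [List.length_cons]; omega : xs.length ≠ (y :: ys).length)]
    simp only [List.range_succ_eq_map, List.any_cons, List.any_map, Function.comp_def,
      List.take_succ_cons, List.drop_succ_cons, List.take_zero, List.drop_zero,
      List.cons_beq_cons, hxy', Bool.false_and, Bool.and_false]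
    simp [List.drop_one]
  · -- b shorter by one: only deleting a's first char can work
    rw [beq_false_of_length_ne (by omega : xs.length ≠ ys.length),
      beq_false_of_length_ne (by simp only [List.length_cons]; omega : (x :: xs).length ≠ ys.length)]
    simp only [List.range_succ_eq_map, List.any_cons, List.any_map, Function.comp_def,
      List.take_succ_cons, List.drop_succ_cons, List.take_zero, List.drop_zero,
      List.cons_beq_cons, hxy', Bool.false_and, Bool.and_false]
    simp [List.drop_one]

lemma edOne_eq : ∀ (a b : List Char), edOneA a b = oneEditB a b := by
  intro a
  induction a with
  | nil =>
    intro b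
    cases b with
    | nil => decide
    | cons y ys =>
      cases ys with
      | nil =>
        show edOneA [] [y] = oneEditB [] [y]
        simp [edOneA, oneEditB, PySem.List.len, sliceFromSucc]
      | cons z zs =>
        show edOneA [] (y :: z :: zs) = oneEditB [] (y :: z :: zs)
        simp [edOneA, oneEditB, PySem.List.len]
        omega
  | cons x xs ih =>
    intro b
    cases b with
    | nil =>
      cases xs with
      | nil =>
        show edOneA [x] [] = oneEditB [x] []
        simp [edOneA, oneEditB, PySem.List.len, sliceFromSucc]
      | cons z zs =>
        show edOneA (x :: z :: zs) [] = oneEditB (x :: z :: zs) []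
        simp [edOneA, oneEditB, PySem.List.len]
        omega
    | cons y ys =>
      by_cases hxy : x = y
      · subst hxy
        rw [edOneA_cons_same, ih]
        simp [oneEditB]
      · rw [edOneA_cons_ne x y xs ys hxy]
        simp [oneEditB, hxy]

-- ===== VERDICT (by name: the statement is the Claim_ definition above) =====
theorem normalize_cmd_py_spec : Claim_equal_normalize_cmd_py := by
  intro cmd _
  unfold Spec_normalize_cmd_py normalize_cmd_py normalize_cmd_py_alt
  have hfun : (fun k : String => edOneA cmd.toList k.toList) =
      (fun k : String => oneEditB cmd.toList k.toList) := by
    funext k; exact edOne_eq _ _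
  simp only [hfun]
  cases PySem.Dict.get?
    (PySem.Dict.ofList [("a", "attack"), ("atk", "attack"), ("c", "cast"), ("s", "status"), ("q", "quit")]) cmd with
  | some v => rfl
  | none =>
    cases (["attack", "cast", "status", "quit", "end", "save", "load", "actions", "grapple", "shove", "stand"] :
        List String).find? (fun k => oneEditB cmd.toList k.toList) with
    | some k => rfl
    | none => rfl
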